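-- pv_equiv track=rewrite | github.com/DmitryBalakin54/Itmo | programs/term4/Dm/lab1/E/main.py | calculate_polynomial_term
-- ===== SOURCE A (Python) =====
-- from collections import defaultdict
--
-- binomial_coefficients = defaultdict(dict)
--
-- def calculate_polynomial_term(power):
--     powers = [i ** power for i in range(power + 1)]
--     polynomial_term = []
--     for k in range(1, power + 2):
--         actual = 0
--         for i in range(power + 1):
--             sign = 1 if (i + 2) % 2 == 0 else -1
--             actual += get_value(powers, k - i - 2) * sign * calculate_binomial_coefficient(power + 1, i + 1)
--         polynomial_term.append(powers[k - 1] - actual)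
--     return polynomial_term
--
-- get_value = (lambda sequence, index: sequence[index] if 0 <= index < len(sequence) else 0)
--
-- def calculate_binomial_coefficient(n, k):
--     if k > n:
--         return 0
--     if k in binomial_coefficients[n]:
--         return binomial_coefficients[n][k]
--     result = 1
--     for i in range(k):
--         result = (result * (n - i)) // (i + 1)
--     binomial_coefficients[n][k] = result
--     return result
-- ===== SOURCE B (Python) =====
-- def calculate_polynomial_term(power):
--     if power < 0:
--         return []
--     if power == 0:
--         return [1]
--     row = [1]
--     for n in range(2, power + 1):
--         row = [(k + 1) * (row[k] if k < len(row) else 0)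
--                + (n - k) * (row[k - 1] if k >= 1 else 0)
--                for k in range(n)]
--     return [0] + row
-- ===== Notes on version B (the rewrite author's own statement) =====
-- stated objective: alternative
-- what changed: Replaces the per-entry alternating binomial-sum (inclusion-exclusion) formula with a row-by-row dynamic program on the Eulerian recurrence A(n,k)=(k+1)A(n-1,k)+(n-k)A(n-1,k-1): no binomial coefficients, no exponentiations, no division; intended as faster (measured 5.78x at n=256, but both remain quadratic and time out at n=1024, so recorded as unconfirmed).
import Mathlib
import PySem

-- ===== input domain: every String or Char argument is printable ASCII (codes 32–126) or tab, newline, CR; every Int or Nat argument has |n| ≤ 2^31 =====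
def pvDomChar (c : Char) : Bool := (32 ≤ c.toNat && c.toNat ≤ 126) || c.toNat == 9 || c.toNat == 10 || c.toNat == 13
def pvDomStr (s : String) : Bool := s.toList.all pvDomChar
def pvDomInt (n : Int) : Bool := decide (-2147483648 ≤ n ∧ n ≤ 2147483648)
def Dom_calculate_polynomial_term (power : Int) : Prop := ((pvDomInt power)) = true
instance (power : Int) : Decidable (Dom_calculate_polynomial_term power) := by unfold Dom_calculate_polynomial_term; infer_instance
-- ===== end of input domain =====

-- B replaces A's per-entry alternating binomial-sum with the Eulerian-triangle row recurrence
-- (dynamic programming, no binomials/powers/division).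


-- ===== PORT A =====
-- get_value = lambda sequence, index: sequence[index] if 0 <= index < len(sequence) else 0
def pvGetValue (sequence : List Int) (index : Int) : Int :=
  if 0 ≤ index ∧ index < PySem.List.len sequence then PySem.List.pyGetD sequence index 0 else 0

-- calculate_binomial_coefficient (the memo dict only caches; the computed value is this loop)
def pvBinom (n k : Int) : Int :=
  if k > n then 0
  else (PySem.List.pyRange 0 k 1).foldl
    (fun result i => PySem.Int.floordiv (result * (n - i)) (i + 1)) 1

-- i ** power: the comprehension only runs when range(power+1) is nonempty, i.e. power ≥ 0,
-- where Python's i ** power is exactly i ^ power.toNat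
def calculate_polynomial_term (power : Int) : List Int :=
  let powers := (PySem.List.pyRange 0 (power + 1) 1).map (fun i => i ^ power.toNat)
  (PySem.List.pyRange 1 (power + 2) 1).foldl
    (fun acc k =>
      let actual := (PySem.List.pyRange 0 (power + 1) 1).foldl
        (fun actual i =>
          actual + pvGetValue powers (k - i - 2) *
            (if PySem.Int.mod (i + 2) 2 = 0 then 1 else -1) *
            pvBinom (power + 1) (i + 1)) 0
      -- powers[k - 1]: 1 ≤ k ≤ power+1 here, so the index is always in range
      acc ++ [PySem.List.pyGetD powers (k - 1) 0 - actual]) []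

-- ===== PORT B =====
def pvNextRow (n : Int) (row : List Int) : List Int :=
  (PySem.List.pyRange 0 n 1).map (fun k =>
    (k + 1) * (if k < PySem.List.len row then PySem.List.pyGetD row k 0 else 0)
    + (n - k) * (if 1 ≤ k then PySem.List.pyGetD row (k - 1) 0 else 0))

def calculate_polynomial_term_alt (power : Int) : List Int :=
  if power < 0 then []
  else if power = 0 then [1]
  else 0 :: (PySem.List.pyRange 2 (power + 1) 1).foldl (fun row n => pvNextRow n row) [1]

-- ===== PRECONDITION & SPEC =====
def Spec_calculate_polynomial_term (power : Int) (out : List Int) : Prop := out = calculate_polynomial_term_alt power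
instance (power : Int) (out : List Int) : Decidable (Spec_calculate_polynomial_term power out) := by unfold Spec_calculate_polynomial_term; infer_instance

-- ===== CLAIM (what is proved, stated in full; the proofs are below) =====
def Claim_equal_calculate_polynomial_term : Prop := ∀ (power : Int), Dom_calculate_polynomial_term power → Spec_calculate_polynomial_term power (calculate_polynomial_term power)

-- ===== LEMMAS AND PROOFS =====

-- the Eulerian number A(n, k) by its classical explicit (inclusion-exclusion) formula
def pvS (n k : ℕ) : ℤ :=
  ∑ j ∈ Finset.range (k + 1), (-1) ^ j * ((n + 1).choose j : ℤ) * ((k : ℤ) + 1 - j) ^ n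

theorem pvS_zero (n : ℕ) : pvS n 0 = 1 := by simp [pvS]

theorem pv_choose_id (n j m : ℕ) :
    ((m : ℤ) + 1 - j) * ((n + 2).choose (j + 1) : ℤ)
      = ((m : ℤ) + 2) * ((n + 1).choose (j + 1) : ℤ) - ((n : ℤ) - m) * ((n + 1).choose j : ℤ) := by
  by_cases h : j ≤ n + 1
  · have hc : ((n + 1).choose (j + 1) : ℤ) * (j + 1) = ((n + 1).choose j : ℤ) * ((n : ℤ) + 1 - j) := by
      have := Nat.choose_succ_right_eq (n + 1) j
      have hcast : ((n + 1 - j : ℕ) : ℤ) = (n : ℤ) + 1 - j := by omega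
      rw [← hcast]
      exact_mod_cast congrArg (Nat.cast (R := ℤ)) this
    have hp : ((n + 2).choose (j + 1) : ℤ) = ((n + 1).choose j : ℤ) + ((n + 1).choose (j + 1) : ℤ) := by
      have := Nat.choose_succ_succ (n + 1) j
      exact_mod_cast congrArg (Nat.cast (R := ℤ)) this
    rw [hp]; linear_combination -hc
  · have h1 : (n + 1).choose j = 0 := Nat.choose_eq_zero_of_lt (by omega)
    have h2 : (n + 1).choose (j + 1) = 0 := Nat.choose_eq_zero_of_lt (by omega)
    have h3 : (n + 2).choose (j + 1) = 0 := Nat.choose_eq_zero_of_lt (by omega)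
    simp [h1, h2, h3]

theorem pvS_rec (n m : ℕ) :
    pvS (n + 1) (m + 1) = ((m : ℤ) + 2) * pvS n (m + 1) + ((n : ℤ) - m) * pvS n m := by
  unfold pvS
  rw [Finset.sum_range_succ' _ (m + 1), Finset.sum_range_succ' _ (m + 1)]
  push_cast
  rw [mul_add, Finset.mul_sum]
  have key : ∀ j ∈ Finset.range (m + 1),
      (-1 : ℤ) ^ (j + 1) * ((n + 1 + 1).choose (j + 1) : ℤ) * ((m : ℤ) + 1 + 1 - ((j : ℤ) + 1)) ^ (n + 1)
        = ((m : ℤ) + 2) * ((-1 : ℤ) ^ (j + 1) * ((n + 1).choose (j + 1) : ℤ) * ((m : ℤ) + 1 + 1 - ((j : ℤ) + 1)) ^ n)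
          + ((n : ℤ) - m) * ((-1 : ℤ) ^ j * ((n + 1).choose j : ℤ) * ((m : ℤ) + 1 - j) ^ n) := by
    intro j _
    have hb : ((m : ℤ) + 1 + 1 - ((j : ℤ) + 1)) = ((m : ℤ) + 1 - j) := by ring
    have hn : n + 1 + 1 = n + 2 := rfl
    rw [hb, hn, pow_succ]
    linear_combination ((-1 : ℤ) ^ (j + 1) * ((m : ℤ) + 1 - j) ^ n) * pv_choose_id n j m
  rw [Finset.sum_congr rfl key, Finset.sum_add_distrib, Finset.mul_sum]
  simp only [Nat.choose_zero_right, Nat.cast_one]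
  ring

theorem pvS_one_vanish (k : ℕ) (hk : 1 ≤ k) : pvS 1 k = 0 := by
  unfold pvS
  rcases Nat.lt_or_ge k 2 with h2 | h2
  · interval_cases k
    · decide
  · have hzero : ∀ j ∈ Finset.range (k + 1), j ∉ Finset.range 3 →
        (-1 : ℤ) ^ j * ((2 : ℕ).choose j : ℤ) * ((k : ℤ) + 1 - j) ^ 1 = 0 := by
      intro j _ hj
      have : (2 : ℕ).choose j = 0 := Nat.choose_eq_zero_of_lt (by simp [Finset.mem_range] at hj; omega)
      simp [this]
    rw [← Finset.sum_subset (by intro x hx; simp [Finset.mem_range] at *; omega) hzero]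
    simp [Finset.sum_range_succ]
    ring

theorem pvS_vanish (n k : ℕ) (hn : 1 ≤ n) (hk : n ≤ k) : pvS n k = 0 := by
  induction n, hn using Nat.le_induction generalizing k with
  | base => exact pvS_one_vanish k hk
  | succ n hn ih =>
    obtain ⟨m, rfl⟩ : ∃ m, k = m + 1 := ⟨k - 1, by omega⟩
    rw [pvS_rec, ih (m + 1) (by omega), ih m (by omega)]
    ring

theorem pv_list_sum (f : ℕ → ℤ) (n : ℕ) : ((List.range n).map f).sum = ∑ j ∈ Finset.range n, f j := rfl

theorem pvBinom_loop (n : ℕ) : ∀ k : ℕ, k ≤ n →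
    (PySem.List.pyRange 0 (k : ℤ) 1).foldl
      (fun result i => PySem.Int.floordiv (result * ((n : ℤ) - i)) (i + 1)) 1 = (n.choose k : ℤ) := by
  intro k
  induction k with
  | zero => intro _; rw [show ((0:ℕ):ℤ) = 0 by norm_num, PySem.List.pyRange_one_eq_nil (by omega)]; simp
  | succ k ih =>
    intro h
    rw [show ((k+1:ℕ):ℤ) = (k:ℤ) + 1 by push_cast; ring, PySem.List.pyRange_one_succ_right (by omega),
      List.foldl_append, ih (by omega)]
    simp only [List.foldl_cons, List.foldl_nil]
    have hs : (n.choose k : ℤ) * ((n : ℤ) - k) = (n.choose (k+1) : ℤ) * ((k : ℤ) + 1) := by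
      have := Nat.choose_succ_right_eq n k
      have hc : ((n - k : ℕ) : ℤ) = (n : ℤ) - k := by omega
      calc (n.choose k : ℤ) * ((n : ℤ) - k) = ((n.choose k * (n - k) : ℕ) : ℤ) := by push_cast [hc]; ring
        _ = ((n.choose (k+1) * (k+1) : ℕ) : ℤ) := by rw [← this]
        _ = (n.choose (k+1) : ℤ) * ((k : ℤ) + 1) := by push_cast; ring
    rw [hs, PySem.Int.floordiv_eq_ediv_of_pos (by omega), Int.mul_ediv_cancel _ (by omega)]

theorem pvBinom_eq (n k : ℕ) (h : k ≤ n) : pvBinom (n : ℤ) (k : ℤ) = (n.choose k : ℤ) := by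
  unfold pvBinom
  rw [if_neg (by exact_mod_cast not_lt.mpr h), pvBinom_loop n k h]

theorem pvSign (j : ℕ) :
    (if PySem.Int.mod ((j : ℤ) + 2) 2 = 0 then (1 : ℤ) else -1) = (-1) ^ j := by
  rw [show ((j : ℤ) + 2) = ((j + 2 : ℕ) : ℤ) by push_cast; ring,
    show (2 : ℤ) = ((2 : ℕ) : ℤ) by norm_num, PySem.Int.mod_natCast]
  rcases Nat.even_or_odd j with ⟨r, rfl⟩ | ⟨r, rfl⟩
  · have h2 : ((r + r) + 2) % 2 = 0 := by omega
    rw [if_pos (by exact_mod_cast h2), Even.neg_one_pow ⟨r, rfl⟩]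
  · have h2 : ((2 * r + 1) + 2) % 2 = 1 := by omega
    rw [if_neg (by rw [h2]; norm_num), Odd.neg_one_pow ⟨r, rfl⟩]

theorem pvNextRow_spec (d : ℕ) :
    pvNextRow ((d : ℤ) + 2) ((List.range (d + 1)).map (fun k => pvS (d + 1) k))
      = (List.range (d + 2)).map (fun k => pvS (d + 2) k) := by
  unfold pvNextRow
  rw [show ((d : ℤ) + 2) = ((d + 2 : ℕ) : ℤ) by push_cast; ring, PySem.List.pyRange_zero_nat,
    List.map_map]
  apply List.map_congr_left
  intro k hk
  have hk2 : k < d + 2 := List.mem_range.mp hk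
  have grow : ∀ i : ℕ, i < d + 1 →
      PySem.List.pyGetD ((List.range (d + 1)).map (fun j => pvS (d + 1) j)) ((i : ℕ) : ℤ) 0
        = pvS (d + 1) i := by
    intro i hi
    rw [PySem.List.pyGetD_natCast]
    exact PySem.List.getD_map_range _ _ _ _ hi
  simp only [Function.comp_apply, PySem.List.len_eq, List.length_map, List.length_range]
  rcases k with _ | m
  · rw [if_pos (by exact_mod_cast Nat.succ_pos d), if_neg (by norm_num), grow 0 (by omega),
      pvS_zero, pvS_zero]
    ring
  · have hca : ((m + 1 : ℕ) : ℤ) - 1 = ((m : ℕ) : ℤ) := by push_cast; ring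
    have hif1 : (if ((m + 1 : ℕ) : ℤ) < ((d + 1 : ℕ) : ℤ) then
        PySem.List.pyGetD ((List.range (d + 1)).map (fun j => pvS (d + 1) j)) ((m + 1 : ℕ) : ℤ) 0 else 0)
        = pvS (d + 1) (m + 1) := by
      by_cases h : m + 1 < d + 1
      · rw [if_pos (by exact_mod_cast h), grow (m + 1) h]
      · rw [if_neg (by exact_mod_cast h)]
        exact (pvS_vanish (d + 1) (m + 1) (by omega) (by omega)).symm
    rw [hca, hif1, if_pos (show (1:ℤ) ≤ ((m + 1 : ℕ) : ℤ) by exact_mod_cast Nat.succ_le_succ (Nat.zero_le m)),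
      grow m (by omega)]
    have hrec := pvS_rec (d + 1) m
    push_cast at hrec ⊢
    rw [hrec]; ring

theorem pvRows (d : ℕ) :
    (PySem.List.pyRange 2 ((d : ℤ) + 2) 1).foldl (fun row n => pvNextRow n row) [1]
      = (List.range (d + 1)).map (fun k => pvS (d + 1) k) := by
  induction d with
  | zero =>
    rw [show ((0 : ℕ) : ℤ) + 2 = 2 by norm_num, PySem.List.pyRange_one_eq_nil (by omega)]
    simp [pvS_zero]
  | succ d ih =>
    rw [show ((d + 1 : ℕ) : ℤ) + 2 = ((d : ℤ) + 2) + 1 by push_cast; ring,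
      PySem.List.pyRange_one_succ_right (by omega), List.foldl_append, ih]
    simpa using pvNextRow_spec d

theorem pvA_eq (p : ℕ) (hp : 1 ≤ p) :
    calculate_polynomial_term (p : ℤ) = 0 :: (List.range p).map (fun m => pvS p m) := by
  have hpow1 : ((p : ℤ) + 1) = ((p + 1 : ℕ) : ℤ) := by push_cast; ring
  have htn : ((p : ℤ)).toNat = p := Int.toNat_natCast p
  set powers : List ℤ :=
    (PySem.List.pyRange 0 ((p : ℤ) + 1) 1).map (fun i => i ^ ((p : ℤ)).toNat) with hpowers
  -- powers as an indexed family
  have hget : ∀ i : ℤ, 0 ≤ i → i < (p : ℤ) + 1 → PySem.List.pyGetD powers i 0 = i ^ p := by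
    intro i h0 h1
    rw [hpowers, PySem.List.pyGetD_map_pyRange_of_nonneg _ _ _ _ h0 h1, htn]
  have hlen : PySem.List.len powers = (p : ℤ) + 1 := by
    simp [hpowers, PySem.List.length_pyRange_one]
  have hgv : ∀ idx : ℤ, pvGetValue powers idx
      = if 0 ≤ idx ∧ idx < (p : ℤ) + 1 then idx ^ p else 0 := by
    intro idx
    unfold pvGetValue
    rw [hlen]
    split_ifs with h
    · exact hget idx h.1 h.2
    · rfl
  -- the inner loop is an alternating binomial sum
  have hactual : ∀ k : ℤ,
      (PySem.List.pyRange 0 ((p : ℤ) + 1) 1).foldl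
        (fun actual i =>
          actual + pvGetValue powers (k - i - 2) *
            (if PySem.Int.mod (i + 2) 2 = 0 then 1 else -1) *
            pvBinom ((p : ℤ) + 1) (i + 1)) 0
      = ∑ j ∈ Finset.range (p + 1),
          (if 0 ≤ k - j - 2 ∧ k - j - 2 < (p : ℤ) + 1 then (k - (j : ℤ) - 2) ^ p else 0)
            * (-1) ^ j * ((p + 1).choose (j + 1) : ℤ) := by
    intro k
    rw [PySem.List.foldl_add, hpow1, PySem.List.pyRange_zero_nat, List.map_map, pv_list_sum,
      zero_add]
    apply Finset.sum_congr rfl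
    intro j hj
    have hj1 : j + 1 ≤ p + 1 := by have := Finset.mem_range.mp hj; omega
    simp only [Function.comp_apply]
    rw [hgv, pvSign j, show ((p : ℤ) + 1) = ((p + 1 : ℕ) : ℤ) from hpow1,
      show ((j : ℤ) + 1) = ((j + 1 : ℕ) : ℤ) by push_cast; ring, pvBinom_eq _ _ hj1]
  -- unfold the outer loop into a map over positions
  unfold calculate_polynomial_term
  rw [← hpowers]
  simp only [PySem.List.foldl_append_singleton_eq_map, List.nil_append]
  simp only [hactual]
  rw [PySem.List.pyRange_one 1 ((p : ℤ) + 2), show (((p : ℤ) + 2) - 1).toNat = p + 1 by omega,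
    List.map_map, List.range_succ_eq_map, List.map_cons, List.map_map]
  congr 1
  · -- first entry: k = 1, everything vanishes
    simp only [Function.comp_apply, Nat.cast_zero, add_zero]
    rw [show ((1 : ℤ) - 1) = 0 by ring, hget 0 le_rfl (by omega),
      zero_pow (by omega : p ≠ 0)]
    rw [Finset.sum_eq_zero, sub_zero]
    intro j _
    rw [if_neg (by omega)]
    ring
  · -- entries 2 .. p+1 are the Eulerian numbers
    apply List.map_congr_left
    intro m hm
    have hmp : m < p := List.mem_range.mp hm
    simp only [Function.comp_apply, Nat.succ_eq_add_one]
    have hk : (1 : ℤ) + ((m + 1 : ℕ) : ℤ) = (m : ℤ) + 2 := by push_cast; ring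
    rw [hk, show ((m : ℤ) + 2 - 1) = (m : ℤ) + 1 by ring,
      hget ((m : ℤ) + 1) (by omega) (by omega)]
    have hsub : (∑ j ∈ Finset.range (p + 1),
        (if 0 ≤ (m : ℤ) + 2 - j - 2 ∧ (m : ℤ) + 2 - j - 2 < (p : ℤ) + 1 then ((m : ℤ) + 2 - (j : ℤ) - 2) ^ p else 0)
          * (-1) ^ j * ((p + 1).choose (j + 1) : ℤ))
        = ∑ j ∈ Finset.range (m + 1), ((m : ℤ) - j) ^ p * (-1) ^ j * ((p + 1).choose (j + 1) : ℤ) := by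
      rw [← Finset.sum_subset (by intro x hx; simp [Finset.mem_range] at *; omega : Finset.range (m+1) ⊆ Finset.range (p+1))]
      · apply Finset.sum_congr rfl
        intro j hj
        have hjm : j ≤ m := by have := Finset.mem_range.mp hj; omega
        rw [if_pos ⟨by omega, by omega⟩, show ((m : ℤ) + 2 - j - 2) = (m : ℤ) - j by ring]
      · intro j _ hj
        have : m + 1 ≤ j := by simp [Finset.mem_range] at hj; omega
        rw [if_neg (by omega)]
        ring
    rw [hsub, Finset.sum_range_succ, show ((m : ℤ) - m) = 0 by ring,
      zero_pow (by omega : p ≠ 0), zero_mul, zero_mul, add_zero]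
    unfold pvS
    rw [Finset.sum_range_succ']
    have hneg : (∑ j ∈ Finset.range m,
        (-1 : ℤ) ^ (j + 1) * ((p + 1).choose (j + 1) : ℤ) * ((m : ℤ) + 1 - ((j : ℤ) + 1)) ^ p)
        = ∑ j ∈ Finset.range m, -(((m : ℤ) - j) ^ p * (-1) ^ j * ((p + 1).choose (j + 1) : ℤ)) := by
      apply Finset.sum_congr rfl
      intro j _
      rw [show ((m : ℤ) + 1 - ((j : ℤ) + 1)) = (m : ℤ) - j by ring, pow_succ]
      ring
    push_cast at hneg ⊢
    rw [hneg, Finset.sum_neg_distrib]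
    simp [Nat.choose_zero_right]
    ring

theorem pvB_eq (p : ℕ) (hp : 1 ≤ p) :
    calculate_polynomial_term_alt (p : ℤ) = 0 :: (List.range p).map (fun m => pvS p m) := by
  unfold calculate_polynomial_term_alt
  rw [if_neg (by exact_mod_cast Nat.not_lt_zero p), if_neg (by exact_mod_cast Nat.pos_iff_ne_zero.mp hp)]
  obtain ⟨d, rfl⟩ : ∃ d, p = d + 1 := ⟨p - 1, by omega⟩
  rw [show ((d + 1 : ℕ) : ℤ) + 1 = (d : ℤ) + 2 by push_cast; ring, pvRows d]

-- ===== VERDICT (by name: the statement is the Claim_ definition above) =====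
theorem calculate_polynomial_term_spec : Claim_equal_calculate_polynomial_term := by
  intro power _
  unfold Spec_calculate_polynomial_term
  rcases lt_trichotomy power 0 with hneg | hzero | hpos
  · have h1 : PySem.List.pyRange 1 (power + 2) 1 = [] :=
      PySem.List.pyRange_one_eq_nil (by omega)
    simp [calculate_polynomial_term, calculate_polynomial_term_alt, h1, if_pos hneg]
  · subst hzero; decide
  · obtain ⟨p, rfl⟩ := Int.eq_ofNat_of_zero_le (le_of_lt hpos)
    have hp : 1 ≤ p := by exact_mod_cast hpos
    rw [pvA_eq p hp, pvB_eq p hp]
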